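-- pv_equiv track=rewrite | github.com/netra-systems/zen | netra_backend/tests/unit/agents/supervisor/test_execution_engine_isolation.py | _analyze_concurrent_execution_timeline
-- ===== SOURCE A (Python) =====
-- from typing import Dict, List, Any, Optional
--
-- def _analyze_concurrent_execution_timeline(timeline: List[Dict], max_allowed: int) -> int:
--     """Analyze execution timeline to determine maximum concurrent executions."""
--     # Group events by execution_id
--     executions = {}
--     for event in timeline:
--         exec_id = event['execution_id']
--         if exec_id not in executions:
--             executions[exec_id] = {}
--         executions[exec_id].update(event)
--
--     # Build timeline events
--     events = []
--
--     for exec_data in executions.values():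
--         if 'start_time' in exec_data and 'end_time' in exec_data:
--             events.append((exec_data['start_time'], 'start'))
--             events.append((exec_data['end_time'], 'end'))
--
--     if not events:
--         return 0
--
--     # Sort events by time, with 'end' events before 'start' events at same time
--     events.sort(key=lambda x: (x[0], x[1] == 'start'))
--
--     max_concurrent = 0
--     current_concurrent = 0
--
--     for timestamp, event_type in events:
--         if event_type == 'start':
--             current_concurrent += 1
--             max_concurrent = max(max_concurrent, current_concurrent)
--         else:  # end
--             current_concurrent -= 1
--
--     return max_concurrent
-- ===== SOURCE B (Python) =====
-- from typing import Dict, List, Any, Optional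
--
-- def _analyze_concurrent_execution_timeline(timeline: List[Dict], max_allowed: int) -> int:
--     """Max concurrent executions via two sorted arrays and a two-pointer merge."""
--     # Group events by execution_id (same grouping phase as before)
--     executions = {}
--     for event in timeline:
--         exec_id = event['execution_id']
--         if exec_id not in executions:
--             executions[exec_id] = {}
--         executions[exec_id].update(event)
--
--     complete = [e for e in executions.values()
--                 if 'start_time' in e and 'end_time' in e]
--     starts = sorted(e['start_time'] for e in complete)
--     ends = sorted(e['end_time'] for e in complete)
--
--     count = 0
--     best = 0
--     i = j = 0
--     n = len(starts)
--     while i < n: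
--         if j < n and ends[j] <= starts[i]:
--             # an end at or before this start closes first (ties: end before start)
--             count -= 1
--             j += 1
--         else:
--             count += 1
--             i += 1
--             if count > best:
--                 best = count
--     return best
-- ===== Notes on version B (the rewrite author's own statement) =====
-- stated objective: alternative
-- what changed: The combined (time, type) event list with its tuple-key sort and single sweep is replaced by two independently sorted arrays of start times and end times walked with a two-pointer merge and a running counter (ties resolved end-first by the <= comparison); the grouping-by-execution_id phase is unchanged.
import Mathlib
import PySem

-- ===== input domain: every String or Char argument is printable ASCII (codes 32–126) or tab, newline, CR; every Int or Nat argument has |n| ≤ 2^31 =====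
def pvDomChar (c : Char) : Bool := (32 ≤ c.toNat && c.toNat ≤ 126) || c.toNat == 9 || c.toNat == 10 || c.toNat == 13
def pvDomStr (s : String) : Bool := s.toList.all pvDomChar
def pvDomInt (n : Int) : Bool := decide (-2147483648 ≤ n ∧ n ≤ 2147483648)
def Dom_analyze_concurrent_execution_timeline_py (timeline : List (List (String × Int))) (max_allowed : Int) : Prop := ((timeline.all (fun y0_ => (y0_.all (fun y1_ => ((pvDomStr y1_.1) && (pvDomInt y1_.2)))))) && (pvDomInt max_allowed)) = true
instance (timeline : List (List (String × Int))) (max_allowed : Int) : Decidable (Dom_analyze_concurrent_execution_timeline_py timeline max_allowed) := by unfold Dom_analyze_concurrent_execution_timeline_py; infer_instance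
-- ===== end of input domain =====

-- B replaces A's single combined-event sort-and-sweep by two independently sorted arrays
-- (start times / end times) walked with a two-pointer merge; same grouping phase, same result.

-- ===== PORT A =====
-- shared grouping phase (the Python of A and of B contain this loop verbatim):
-- executions = {}; for event: exec_id = event['execution_id']; setdefault {}; update(event)
def pvGroup (timeline : List (List (String × Int))) : PySem.Dict Int (PySem.Dict String Int) :=
  timeline.foldl (fun exs ev =>
    let exec_id := (PySem.Dict.ofList ev).getD "execution_id" 0  -- KeyError if absent: excluded by Pre_
    exs.insert exec_id ((exs.getD exec_id PySem.Dict.empty).update ev)) PySem.Dict.empty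

def analyze_concurrent_execution_timeline_py (timeline : List (List (String × Int))) (max_allowed : Int) : Int :=
  let executions := pvGroup timeline
  let events : List (Int × String) :=
    executions.values.foldl (fun evs ed =>
      if ed.contains "start_time" && ed.contains "end_time" then
        (evs ++ [(ed.getD "start_time" 0, "start")]) ++ [(ed.getD "end_time" 0, "end")]
      else evs) []
  if events = [] then 0
  else
    let sortedEvents := PySem.List.sorted2 events (fun x => x.1) (fun x => x.2 == "start")
    (sortedEvents.foldl (fun (p : Int × Int) ev =>
        if ev.2 == "start" then (max p.1 (p.2 + 1), p.2 + 1) else (p.1, p.2 - 1))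
      ((0 : Int), (0 : Int))).1

-- ===== PORT B =====
-- the two-pointer while loop of Source B: i/j pointers become the two list arguments
def pvSweep2 : List Int → List Int → Int → Int → Int
  | [], _, _, best => best
  | _ :: ss, [], count, best =>
      pvSweep2 ss [] (count + 1) (if count + 1 > best then count + 1 else best)
  | s :: ss, e :: es, count, best =>
      if e ≤ s then pvSweep2 (s :: ss) es (count - 1) best
      else pvSweep2 ss (e :: es) (count + 1) (if count + 1 > best then count + 1 else best)
  termination_by ss es _ _ => ss.length + es.length

def analyze_concurrent_execution_timeline_py_alt (timeline : List (List (String × Int))) (max_allowed : Int) : Int :=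
  let executions := pvGroup timeline
  let complete := executions.values.filter (fun e => e.contains "start_time" && e.contains "end_time")
  let starts := PySem.List.sorted (complete.map (fun e => e.getD "start_time" 0)) (fun x => x) false
  let ends := PySem.List.sorted (complete.map (fun e => e.getD "end_time" 0)) (fun x => x) false
  pvSweep2 starts ends 0 0

-- ===== PRECONDITION & SPEC =====
-- Pre_ excludes exactly the inputs where the Python raises KeyError: an event without an 'execution_id' key.
def Pre_analyze_concurrent_execution_timeline_py (timeline : List (List (String × Int))) (max_allowed : Int) : Prop :=
  ∀ ev ∈ timeline, "execution_id" ∈ ev.map Prod.fst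
instance (timeline : List (List (String × Int))) (max_allowed : Int) : Decidable (Pre_analyze_concurrent_execution_timeline_py timeline max_allowed) := by unfold Pre_analyze_concurrent_execution_timeline_py; infer_instance

def pvWitness_analyze_concurrent_execution_timeline_py : (List (List (String × Int))) × Int :=
  ([[("execution_id", 1), ("start_time", 0), ("end_time", 5)],
    [("execution_id", 2), ("start_time", 1), ("end_time", 3)]], 4)

def Spec_analyze_concurrent_execution_timeline_py (timeline : List (List (String × Int))) (max_allowed : Int) (out : Int) : Prop := out = analyze_concurrent_execution_timeline_py_alt timeline max_allowed
instance (timeline : List (List (String × Int))) (max_allowed : Int) (out : Int) : Decidable (Spec_analyze_concurrent_execution_timeline_py timeline max_allowed out) := by unfold Spec_analyze_concurrent_execution_timeline_py; infer_instance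

-- ===== CLAIM (what is proved, stated in full; the proofs are below) =====
def Claim_equal_analyze_concurrent_execution_timeline_py : Prop := ∀ (timeline : List (List (String × Int))) (max_allowed : Int), Dom_analyze_concurrent_execution_timeline_py timeline max_allowed → Pre_analyze_concurrent_execution_timeline_py timeline max_allowed → Spec_analyze_concurrent_execution_timeline_py timeline max_allowed (analyze_concurrent_execution_timeline_py timeline max_allowed)

-- ===== LEMMAS AND PROOFS =====

-- the combined sort key A uses, read as a single integer: 2*t (+1 for a 'start', which sorts after 'end' at equal t)
def pvKey (e : Int × String) : Int := 2 * e.1 + (if e.2 == "start" then 1 else 0)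
-- an event as (time, is_start)
def pvIB (e : Int × String) : Int × Bool := (e.1, e.2 == "start")
def pvK (p : Int × Bool) : Int := 2 * p.1 + (if p.2 then 1 else 0)
-- A's sweep step on (max_concurrent, current) state
def pvStep (p : Int × Int) (ev : Int × Bool) : Int × Int :=
  if ev.2 then (max p.1 (p.2 + 1), p.2 + 1) else (p.1, p.2 - 1)
-- the event sequence B's two-pointer walk visits
def pvMerge : List Int → List Int → List (Int × Bool)
  | [], es => es.map (fun e => (e, false))
  | s :: ss, [] => (s, true) :: pvMerge ss []
  | s :: ss, e :: es =>
      if e ≤ s then (e, false) :: pvMerge (s :: ss) es else (s, true) :: pvMerge ss (e :: es)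
  termination_by ss es => ss.length + es.length

theorem pvSorted2_eq (xs : List (Int × String)) :
    PySem.List.sorted2 xs (fun x => x.1) (fun x => x.2 == "start") false
      = PySem.List.sorted xs pvKey false := by
  rw [PySem.List.sorted_eq_foldl_insertBy]
  simp only [PySem.List.sorted2]
  congr 1
  funext acc x
  congr 1
  funext a b
  cases h1 : (a.2 == "start") <;> cases h2 : (b.2 == "start") <;>
    simp [pvKey, h1, h2, Bool.lt_iff, decide_eq_decide]
  · rw [Bool.eq_iff_iff]; simp; omega
  · omega


theorem pvMerge_mem {ss es : List Int} : ∀ {y : Int × Bool}, y ∈ pvMerge ss es →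
    (y.2 = true ∧ y.1 ∈ ss) ∨ (y.2 = false ∧ y.1 ∈ es) := by
  fun_induction pvMerge ss es with
  | case1 es =>
      intro y h
      simp at h; rcases h with ⟨e, he, rfl⟩; simp [he]
  | case2 s ss ih =>
      intro y h
      rcases List.mem_cons.1 h with rfl | h
      · simp
      · rcases ih h with ⟨h1, h2⟩ | ⟨h1, h2⟩
        · exact Or.inl ⟨h1, List.mem_cons_of_mem _ h2⟩
        · simp at h2
  | case3 s ss e es hle ih =>
      intro y h
      rcases List.mem_cons.1 h with rfl | h
      · simp
      · rcases ih h with ⟨h1, h2⟩ | ⟨h1, h2⟩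
        · exact Or.inl ⟨h1, h2⟩
        · exact Or.inr ⟨h1, List.mem_cons_of_mem _ h2⟩
  | case4 s ss e es hle ih =>
      intro y h
      rcases List.mem_cons.1 h with rfl | h
      · simp
      · rcases ih h with ⟨h1, h2⟩ | ⟨h1, h2⟩
        · exact Or.inl ⟨h1, List.mem_cons_of_mem _ h2⟩
        · exact Or.inr ⟨h1, h2⟩


theorem pvMerge_pairwise {ss es : List Int} (hs : ss.Pairwise (· ≤ ·)) (he : es.Pairwise (· ≤ ·)) :
    (pvMerge ss es).Pairwise (fun p q => pvK p ≤ pvK q) := by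
  fun_induction pvMerge ss es with
  | case1 es => exact (he.map _ (fun a b hab => by simp [pvK]; omega))
  | case2 s ss ih =>
      refine List.Pairwise.cons ?_ (ih hs.tail he)
      rintro ⟨t, b⟩ hy
      rcases pvMerge_mem hy with ⟨h1, h2⟩ | ⟨h1, h2⟩
      · have hst := (List.pairwise_cons.1 hs).1 _ h2
        subst h1; simp [pvK]; omega
      · simp at h2
  | case3 s ss e es hle ih =>
      refine List.Pairwise.cons ?_ (ih hs he.tail)
      rintro ⟨t, b⟩ hy
      rcases pvMerge_mem hy with ⟨h1, h2⟩ | ⟨h1, h2⟩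
      · have hst : s ≤ t ∨ s = t := by
          rcases List.mem_cons.1 h2 with rfl | h2
          · exact Or.inr rfl
          · exact Or.inl ((List.pairwise_cons.1 hs).1 _ h2)
        subst h1
        rcases hst with hst | hst
        · simp [pvK]; omega
        · subst hst; simp [pvK]; omega
      · have het := (List.pairwise_cons.1 he).1 _ h2
        subst h1; simp [pvK]; omega
  | case4 s ss e es hle ih =>
      refine List.Pairwise.cons ?_ (ih hs.tail he)
      rintro ⟨t, b⟩ hy
      rcases pvMerge_mem hy with ⟨h1, h2⟩ | ⟨h1, h2⟩
      · have hst := (List.pairwise_cons.1 hs).1 _ h2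
        subst h1; simp [pvK]; omega
      · have het : e ≤ t ∨ e = t := by
          rcases List.mem_cons.1 h2 with rfl | h2
          · exact Or.inr rfl
          · exact Or.inl ((List.pairwise_cons.1 he).1 _ h2)
        subst h1
        rcases het with het | het
        · simp [pvK]; omega
        · subst het; simp [pvK]; omega


theorem pvMerge_perm (ss es : List Int) :
    (pvMerge ss es).Perm (ss.map (fun s => (s, true)) ++ es.map (fun e => (e, false))) := by
  fun_induction pvMerge ss es with
  | case1 es => simp
  | case2 s ss ih => simpa using ih.cons (s, true)
  | case3 s ss e es hle ih =>
      exact (ih.cons (e, false)).trans (List.perm_middle).symm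
  | case4 s ss e es hle ih =>
      simpa using ih.cons (s, true)

theorem pvFold_false (es : List Int) (p : Int × Int) :
    ((es.map (fun e => (e, false))).foldl pvStep p).1 = p.1 := by
  induction es generalizing p with
  | nil => rfl
  | cons e es ih => simpa [pvStep] using ih _

theorem pvStep_true (b c s : Int) :
    pvStep (b, c) (s, true) = (if c + 1 > b then c + 1 else b, c + 1) := by
  by_cases h : c + 1 > b <;> simp [pvStep, max_def, h] <;> omega


theorem pvSweep2_eq (ss es : List Int) (c b : Int) :
    pvSweep2 ss es c b = ((pvMerge ss es).foldl pvStep (b, c)).1 := by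
  fun_induction pvSweep2 ss es c b with
  | case1 es c b => simp [pvMerge, pvFold_false]
  | case2 s ss c b ih =>
      simp only [dite_eq_ite] at ih
      rw [pvMerge, List.foldl_cons, ih, pvStep_true]
  | case3 s ss e es c b hle ih =>
      simp only [dite_eq_ite] at ih
      rw [pvMerge, if_pos hle, List.foldl_cons, ih]
      simp [pvStep]
  | case4 s ss e es c b hle ih =>
      simp only [dite_eq_ite] at ih
      rw [pvMerge, if_neg hle, List.foldl_cons, ih, pvStep_true]

theorem pvK_injective : Function.Injective pvK := by
  rintro ⟨t1, b1⟩ ⟨t2, b2⟩ h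
  cases b1 <;> cases b2 <;> simp [pvK] at h <;> simp <;> omega

theorem pvEvents_perm (vs : List (PySem.Dict String Int)) :
    ((vs.foldl (fun evs ed =>
        if ed.contains "start_time" && ed.contains "end_time" then
          (evs ++ [(ed.getD "start_time" 0, "start")]) ++ [(ed.getD "end_time" 0, "end")]
        else evs) []).map pvIB).Perm
      (((vs.filter (fun e => e.contains "start_time" && e.contains "end_time")).map
          (fun e => (e.getD "start_time" 0, true)))
        ++ ((vs.filter (fun e => e.contains "start_time" && e.contains "end_time")).map
          (fun e => (e.getD "end_time" 0, false)))) := by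
  have hshape : ∀ (evs : List (Int × String)) (ed : PySem.Dict String Int),
      (if ed.contains "start_time" && ed.contains "end_time" then
          (evs ++ [(ed.getD "start_time" 0, "start")]) ++ [(ed.getD "end_time" 0, "end")]
        else evs)
      = evs ++ (if ed.contains "start_time" && ed.contains "end_time" then
          [(ed.getD "start_time" 0, "start"), (ed.getD "end_time" 0, "end")] else []) := by
    intro evs ed; split <;> simp
  rw [PySem.List.foldl_congr_mem _ _ _ _ (fun evs ed _ => hshape evs ed), PySem.List.foldl_append_eq_flatMap,
    List.nil_append]
  induction vs with
  | nil => simp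
  | cons v vs ih =>
      by_cases h : (v.contains "start_time" && v.contains "end_time") = true
      · simp only [List.flatMap_cons, List.filter_cons, h, if_pos h, List.map_cons, List.map_append,
          List.cons_append]
        refine List.Perm.cons _ ?_
        refine List.Perm.trans ?_ (List.perm_middle).symm
        exact List.Perm.cons _ ih
      · simp only [List.flatMap_cons, List.filter_cons, h, if_neg h]
        simpa using ih

-- ===== VERDICT (by name: the statement is the Claim_ definition above) =====
theorem analyze_concurrent_execution_timeline_py_spec : Claim_equal_analyze_concurrent_execution_timeline_py := by
  intro timeline max_allowed _ _
  unfold Spec_analyze_concurrent_execution_timeline_py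
  unfold analyze_concurrent_execution_timeline_py analyze_concurrent_execution_timeline_py_alt
  set vs := (pvGroup timeline).values with hvs
  simp only []
  set events : List (Int × String) := vs.foldl (fun evs ed =>
      if ed.contains "start_time" && ed.contains "end_time" then
        (evs ++ [(ed.getD "start_time" 0, "start")]) ++ [(ed.getD "end_time" 0, "end")]
      else evs) [] with hevents
  set complete := vs.filter (fun e => e.contains "start_time" && e.contains "end_time") with hcomplete
  set starts := PySem.List.sorted (complete.map (fun e => e.getD "start_time" 0)) (fun x => x) false with hstarts
  set ends := PySem.List.sorted (complete.map (fun e => e.getD "end_time" 0)) (fun x => x) false with hends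
  -- the central identity: A's sorted combined event list, read as (time, is_start), IS B's merge
  have hperm0 : (events.map pvIB).Perm
      ((complete.map (fun e => (e.getD "start_time" 0, true)))
        ++ (complete.map (fun e => (e.getD "end_time" 0, false)))) := pvEvents_perm vs
  have hmain : (PySem.List.sorted events pvKey false).map pvIB = pvMerge starts ends := by
    refine PySem.List.eq_of_perm_of_pairwise_le_of_injective pvK pvK_injective ?_ ?_ ?_
    · refine ((((PySem.List.sorted_perm events pvKey false).map pvIB).trans hperm0).trans ?_).trans
        (pvMerge_perm starts ends).symm
      refine List.Perm.append ?_ ?_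
      · have := (PySem.List.sorted_perm (complete.map (fun e => e.getD "start_time" 0)) (fun x => x) false).symm
        simpa [hstarts, List.map_map, Function.comp] using this.map (fun s => (s, true))
      · have := (PySem.List.sorted_perm (complete.map (fun e => e.getD "end_time" 0)) (fun x => x) false).symm
        simpa [hends, List.map_map, Function.comp] using this.map (fun e => (e, false))
    · have := PySem.List.sorted_pairwise events pvKey
      exact this.map _ (fun a b hab => by simpa [pvK, pvIB, pvKey] using hab)
    · exact pvMerge_pairwise
        (by simpa using PySem.List.sorted_pairwise (complete.map (fun e => e.getD "start_time" 0)) (fun x => x))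
        (by simpa using PySem.List.sorted_pairwise (complete.map (fun e => e.getD "end_time" 0)) (fun x => x))
  have hfold : ∀ (l : List (Int × String)) (p : Int × Int),
      l.foldl (fun (p : Int × Int) ev =>
        if ev.2 == "start" then (max p.1 (p.2 + 1), p.2 + 1) else (p.1, p.2 - 1)) p
      = (l.map pvIB).foldl pvStep p := by
    intro l p
    rw [List.foldl_map]
    exact PySem.List.foldl_congr_mem _ _ _ _ (fun acc e _ => by rcases e with ⟨t, s⟩; simp [pvStep, pvIB])
  rw [pvSweep2_eq, pvSorted2_eq, ← hmain]
  by_cases h : events = []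
  · have h0 : complete = [] := by
      rw [h] at hperm0
      simp only [List.map_nil, List.nil_perm, List.append_eq_nil_iff, List.map_eq_nil_iff] at hperm0
      exact hperm0.1
    simp [h, h0, PySem.List.sorted]
  · rw [if_neg h, hfold]
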